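-- pv_equiv track=rewrite | github.com/1withall/nabr | src/nabr/models/verification_types.py | calculate_verification_level
-- ===== SOURCE A (Python) =====
-- from enum import Enum as PyEnum
--
-- class VerificationLevel(str, PyEnum):
--     """
--     Tiered verification levels achieved through progressive trust accumulation.
--
--     Each level requires a MINIMUM TRUST SCORE, not hard method requirements.
--     Different paths can achieve the same level.
--     """
--
--     UNVERIFIED = "unverified"      # 0 points - No verification
--     MINIMAL = "minimal"            # 100+ points - Type-specific baseline
--     STANDARD = "standard"          # 250+ points - Enhanced trust signals
--     ENHANCED = "enhanced"          # 400+ points - Strong multi-method verification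
--     COMPLETE = "complete"          # 600+ points - Comprehensive verification
--
-- LEVEL_THRESHOLDS = {
--     VerificationLevel.UNVERIFIED: 0,
--     VerificationLevel.MINIMAL: 100,
--     VerificationLevel.STANDARD: 250,
--     VerificationLevel.ENHANCED: 400,
--     VerificationLevel.COMPLETE: 600,
-- }
--
-- def calculate_verification_level(
--     trust_score: int,
-- ) -> VerificationLevel:
--     """
--     Determine verification level from trust score.
--
--     Args:
--         trust_score: Total accumulated trust points
--
--     Returns:
--         Achieved verification level
--     """
--     # Check from highest to lowest
--     for level in reversed(list(VerificationLevel)):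
--         threshold = LEVEL_THRESHOLDS.get(level, 0)
--         if trust_score >= threshold:
--             return level
--
--     return VerificationLevel.UNVERIFIED
-- ===== SOURCE B (Python) =====
-- import bisect
--
-- _THRESHOLDS = [0, 100, 250, 400, 600]
-- _LEVELS = ["unverified", "minimal", "standard", "enhanced", "complete"]
--
-- def calculate_verification_level(trust_score: int):
--     # count of thresholds met; clamp 0 (negative score) to UNVERIFIED
--     idx = bisect.bisect_right(_THRESHOLDS, trust_score)
--     return _LEVELS[max(idx - 1, 0)]
-- ===== Notes on version B (the rewrite author's own statement) =====
-- stated objective: idiomatic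
-- what changed: Replaces the reversed high-to-low scan over the enum with dict lookups by a bisect_right count into a precomputed ascending threshold list, clamping the index so negative scores yield the lowest level.
import Mathlib
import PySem

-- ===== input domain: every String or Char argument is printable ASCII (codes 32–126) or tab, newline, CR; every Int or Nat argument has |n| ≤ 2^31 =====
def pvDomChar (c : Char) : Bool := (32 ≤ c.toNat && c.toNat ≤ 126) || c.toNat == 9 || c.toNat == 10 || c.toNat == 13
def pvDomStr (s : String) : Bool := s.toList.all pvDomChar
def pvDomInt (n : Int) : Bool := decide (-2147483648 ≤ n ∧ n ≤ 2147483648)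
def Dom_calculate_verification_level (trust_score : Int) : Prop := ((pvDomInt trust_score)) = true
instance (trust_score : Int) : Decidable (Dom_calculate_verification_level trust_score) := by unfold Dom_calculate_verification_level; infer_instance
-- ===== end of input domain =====

-- B replaces A's reversed high-to-low linear scan with a bisect-style count into an
-- ascending threshold list (idiomatic lookup); same result for every int score.


-- ===== PORT A =====
-- LEVEL_THRESHOLDS, a dict keyed by the enum's value
def levelThresholds : PySem.Dict String Int :=
  PySem.Dict.mk [("unverified", 0), ("minimal", 100), ("standard", 250), ("enhanced", 400), ("complete", 600)]

-- the for-loop of A: first level (in the given order) whose threshold is met, else "unverified"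
def pvLoopA (levels : List String) (trust_score : Int) : String :=
  match levels with
  | [] => "unverified"
  | level :: rest =>
      let threshold := PySem.Dict.getD levelThresholds level 0
      if trust_score ≥ threshold then level else pvLoopA rest trust_score

def calculate_verification_level (trust_score : Int) : String :=
  pvLoopA (["unverified", "minimal", "standard", "enhanced", "complete"].reverse) trust_score

-- ===== PORT B =====
def bThresholds : List Int := [0, 100, 250, 400, 600]
def bLevels : List String := ["unverified", "minimal", "standard", "enhanced", "complete"]

-- bisect.bisect_right on a sorted list = number of elements ≤ trust_score
def calculate_verification_level_alt (trust_score : Int) : String :=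
  let idx : Int := ((bThresholds.countP (fun t => t ≤ trust_score) : Nat) : Int)
  (PySem.List.pyGet? bLevels (max (idx - 1) 0)).getD ""

-- ===== PRECONDITION & SPEC =====
def Spec_calculate_verification_level (trust_score : Int) (out : String) : Prop := out = calculate_verification_level_alt trust_score
instance (trust_score : Int) (out : String) : Decidable (Spec_calculate_verification_level trust_score out) := by unfold Spec_calculate_verification_level; infer_instance

-- ===== CLAIM (what is proved, stated in full; the proofs are below) =====
def Claim_equal_calculate_verification_level : Prop := ∀ (trust_score : Int), Dom_calculate_verification_level trust_score → Spec_calculate_verification_level trust_score (calculate_verification_level trust_score)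

-- ===== LEMMAS AND PROOFS =====

-- ===== VERDICT (by name: the statement is the Claim_ definition above) =====
theorem calculate_verification_level_spec : Claim_equal_calculate_verification_level := by
  intro ts _
  unfold Spec_calculate_verification_level calculate_verification_level calculate_verification_level_alt
  rcases lt_or_ge ts 0 with h | h
  · have h0 : ¬ (0:Int) ≤ ts := by omega
    have h1 : ¬ (100:Int) ≤ ts := by omega
    have h2 : ¬ (250:Int) ≤ ts := by omega
    have h3 : ¬ (400:Int) ≤ ts := by omega
    have h4 : ¬ (600:Int) ≤ ts := by omega
    simp [pvLoopA, levelThresholds, PySem.Dict.getD, PySem.Dict.get?_mk_cons, bThresholds, bLevels,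
      List.countP, List.countP.go, PySem.List.pyGet?, PySem.List.pyIdx?, h0, h1, h2, h3, h4]
  rcases lt_or_ge ts 100 with h' | h'
  · have h1 : ¬ (100:Int) ≤ ts := by omega
    have h2 : ¬ (250:Int) ≤ ts := by omega
    have h3 : ¬ (400:Int) ≤ ts := by omega
    have h4 : ¬ (600:Int) ≤ ts := by omega
    simp [pvLoopA, levelThresholds, PySem.Dict.getD, PySem.Dict.get?_mk_cons, bThresholds, bLevels,
      List.countP, List.countP.go, PySem.List.pyGet?, PySem.List.pyIdx?, h, h1, h2, h3, h4]
  rcases lt_or_ge ts 250 with h'' | h''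
  · have h2 : ¬ (250:Int) ≤ ts := by omega
    have h3 : ¬ (400:Int) ≤ ts := by omega
    have h4 : ¬ (600:Int) ≤ ts := by omega
    simp [pvLoopA, levelThresholds, PySem.Dict.getD, PySem.Dict.get?_mk_cons, bThresholds, bLevels,
      List.countP, List.countP.go, PySem.List.pyGet?, PySem.List.pyIdx?, h, h', h2, h3, h4]
  rcases lt_or_ge ts 400 with h3 | h3
  · have h3' : ¬ (400:Int) ≤ ts := by omega
    have h4 : ¬ (600:Int) ≤ ts := by omega
    simp [pvLoopA, levelThresholds, PySem.Dict.getD, PySem.Dict.get?_mk_cons, bThresholds, bLevels,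
      List.countP, List.countP.go, PySem.List.pyGet?, PySem.List.pyIdx?, h, h', h'', h3', h4]
  rcases lt_or_ge ts 600 with h4 | h4
  · have h4' : ¬ (600:Int) ≤ ts := by omega
    simp [pvLoopA, levelThresholds, PySem.Dict.getD, PySem.Dict.get?_mk_cons, bThresholds, bLevels,
      List.countP, List.countP.go, PySem.List.pyGet?, PySem.List.pyIdx?, h, h', h'', h3, h4']
  · simp [pvLoopA, levelThresholds, PySem.Dict.getD, PySem.Dict.get?_mk_cons, bThresholds, bLevels,
      List.countP, List.countP.go, PySem.List.pyGet?, PySem.List.pyIdx?, h, h', h'', h3, h4]
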